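-- pv_equiv track=rewrite | github.com/L-Sherry/Localize-Me-Tools | checker.py | wrap_output
-- ===== SOURCE A (Python) =====
-- def wrap_output(text, length, indentchar, indentcharwrap=None):
--     to_print = []
--     if indentcharwrap is None:
--         indentcharwrap = indentchar
--
--     def indentbyindex(i):
--         if not to_print:
--             return ""
--         return indentchar if i else indentcharwrap
--
--     for line in text.split('\n'):
--         to_print.extend((indentbyindex(i) + line[i:i+length])
--                         for i in range(0, len(line), length))
--     return "\n".join(to_print)
-- ===== SOURCE B (Python) =====
-- def wrap_output(text, length, indentchar, indentcharwrap=None):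
--     if indentcharwrap is None:
--         indentcharwrap = indentchar
--     out = []
--     for line in text.split('\n'):
--         prefix = indentcharwrap
--         while line and length > 0:
--             chunk, line = line[:length], line[length:]
--             out.append(('' if not out else prefix) + chunk)
--             prefix = indentchar
--     return '\n'.join(out)
-- ===== Notes on version B (the rewrite author's own statement) =====
-- stated objective: alternative
-- what changed: Replaces A's index arithmetic (range(0,len,length) stride indices, slices line[i:i+length], and a closure that picks the prefix by inspecting the shared to_print list and the index i) with a destructive peeling loop: each line is consumed by repeatedly splitting off its first `length` characters, the prefix is carried in a variable that starts as indentcharwrap and degrades to indentchar after the first chunk, and the `length > 0` loop guard makes termination explicit.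
import Mathlib
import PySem

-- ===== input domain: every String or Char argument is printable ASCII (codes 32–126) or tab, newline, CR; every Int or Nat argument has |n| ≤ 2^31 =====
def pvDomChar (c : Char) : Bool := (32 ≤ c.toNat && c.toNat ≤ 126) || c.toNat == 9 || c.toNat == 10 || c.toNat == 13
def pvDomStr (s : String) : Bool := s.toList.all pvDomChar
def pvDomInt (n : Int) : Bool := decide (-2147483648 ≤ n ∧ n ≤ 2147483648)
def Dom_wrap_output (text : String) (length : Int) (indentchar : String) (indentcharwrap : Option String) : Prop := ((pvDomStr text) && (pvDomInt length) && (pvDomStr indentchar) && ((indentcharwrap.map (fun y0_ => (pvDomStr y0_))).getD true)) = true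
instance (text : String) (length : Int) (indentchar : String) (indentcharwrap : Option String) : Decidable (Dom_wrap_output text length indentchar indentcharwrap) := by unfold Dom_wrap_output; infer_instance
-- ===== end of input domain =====

-- B replaces A's range/index arithmetic and state-inspecting prefix closure by a destructive peeling loop (split off the first `length` chars, prefix carried in a variable); alternative decomposition, same cost; return-value equivalence only.


-- ===== PORT A =====
-- A: one running list to_print; each chunk's prefix comes from indentbyindex, which reads the
-- CURRENT state of to_print ("" while it is empty, indentchar for i ≠ 0, indentcharwrap for i = 0).
def wrap_output (text : String) (length : Int) (indentchar : String) (indentcharwrap : Option String) : String :=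
  let icw := indentcharwrap.getD indentchar
  let lines := PySem.Chars.splitOn text.toList ['\n']
  let to_print := lines.foldl (fun acc line =>
    (PySem.List.pyRange 0 (line.length : Int) length).foldl (fun acc2 i =>
      acc2 ++ [(if acc2.isEmpty then []
                else if i ≠ 0 then indentchar.toList else icw.toList)
               ++ PySem.List.slice line (some i) (some (i + length))]) acc)
    ([] : List (List Char))
  String.ofList (PySem.Chars.join ['\n'] to_print)

-- ===== PORT B =====
-- B: 'while line and length > 0' peeling loop; fuel = line.length bounds the iterations
-- (each turn of the admitted loop removes at least one character), making the loop total.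
def pvGo (length : Int) (ic : List Char) : Nat → List Char → List Char → List (List Char) → List (List Char)
  | 0, _, _, out => out
  | fuel + 1, line, pre, out =>
    if line ≠ [] ∧ 0 < length then
      pvGo length ic fuel (PySem.List.slice line (some length) none) ic
        (out ++ [(if out.isEmpty then [] else pre) ++ PySem.List.slice line none (some length)])
    else out

def wrap_output_alt (text : String) (length : Int) (indentchar : String) (indentcharwrap : Option String) : String :=
  let icw := indentcharwrap.getD indentchar
  let out := (PySem.Chars.splitOn text.toList ['\n']).foldl
    (fun out line => pvGo length indentchar.toList line.length line icw.toList out)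
    ([] : List (List Char))
  String.ofList (PySem.Chars.join ['\n'] out)

-- ===== PRECONDITION & SPEC =====
-- Pre_ excludes exactly length = 0, where Python's range(0, len(line), 0) raises ValueError as soon as a line is nonempty.
def Pre_wrap_output (text : String) (length : Int) (indentchar : String) (indentcharwrap : Option String) : Prop := length ≠ 0
instance (text : String) (length : Int) (indentchar : String) (indentcharwrap : Option String) : Decidable (Pre_wrap_output text length indentchar indentcharwrap) := by unfold Pre_wrap_output; infer_instance
def pvWitness_wrap_output : String × Int × String × Option String := ("hello world\nbye", 4, "  ", some "> ")


def Spec_wrap_output (text : String) (length : Int) (indentchar : String) (indentcharwrap : Option String) (out : String) : Prop := out = wrap_output_alt text length indentchar indentcharwrap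
instance (text : String) (length : Int) (indentchar : String) (indentcharwrap : Option String) (out : String) : Decidable (Spec_wrap_output text length indentchar indentcharwrap out) := by unfold Spec_wrap_output; infer_instance

-- ===== CLAIM (what is proved, stated in full; the proofs are below) =====
def Claim_equal_wrap_output : Prop := ∀ (text : String) (length : Int) (indentchar : String) (indentcharwrap : Option String), Dom_wrap_output text length indentchar indentcharwrap → Pre_wrap_output text length indentchar indentcharwrap → Spec_wrap_output text length indentchar indentcharwrap (wrap_output text length indentchar indentcharwrap)

-- ===== LEMMAS AND PROOFS =====

-- the tail of a peel step is strictly shorter (drives all the fuel bounds below)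
theorem pv_rest_len (line : List Char) (length : Int) (h1 : line ≠ []) (h2 : 0 < length) :
    (PySem.List.slice line (some length) none).length < line.length := by
  rw [PySem.List.slice_from line (le_of_lt h2)]
  have h3 : 0 < line.length := List.length_pos_iff.mpr h1
  have h4 : 0 < length.toNat := by omega
  simp only [List.length_drop]
  omega

-- range(0, n, L) is empty for a negative step and nonnegative stop
theorem pv_range_neg (L n : Int) (hL : L < 0) (hn : 0 ≤ n) :
    PySem.List.pyRange 0 n L = [] := by
  unfold PySem.List.pyRange
  rw [if_neg (by omega : ¬ L = 0)]
  simp only [if_neg (not_lt.mpr (le_of_lt hL))]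
  rw [if_neg (by omega : ¬ n < 0)]
  simp

-- range(0, n, L) is empty for a positive step and nonpositive stop
theorem pv_range_nonpos (L n : Int) (hL : 0 < L) (hn : n ≤ 0) :
    PySem.List.pyRange 0 n L = [] := by
  rw [PySem.List.pyRange_of_pos _ _ hL]
  rw [if_neg (by omega : ¬ (0:Int) < n)]
  simp

-- peeling decomposition of range(0, n, L): index 0, then the indices of the rest, shifted by L
theorem pv_range_step (L : Int) (hL : 0 < L) (n : Int) (hn : 0 < n) :
    PySem.List.pyRange 0 n L = 0 :: (PySem.List.pyRange 0 (n - L) L).map (· + L) := by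
  rw [PySem.List.pyRange_of_pos _ _ hL, PySem.List.pyRange_of_pos _ _ hL]
  have hcount : (if (0:Int) < n then ((n - 0 + L - 1) / L).toNat else 0)
      = (if (0:Int) < n - L then ((n - L - 0 + L - 1) / L).toNat else 0) + 1 := by
    rw [if_pos hn]
    by_cases h : (0:Int) < n - L
    · rw [if_pos h]
      have e1 : n - 0 + L - 1 = (n - 1) + 1 * L := by ring
      have e2 : n - L - 0 + L - 1 = n - 1 := by ring
      rw [e1, e2, Int.add_mul_ediv_right _ _ (by omega : L ≠ 0)]
      have hq : 0 ≤ (n - 1) / L := Int.ediv_nonneg (by omega) (by omega)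
      omega
    · rw [if_neg h]
      have h1 : PySem.Int.floordiv (n - 0 + L - 1) L = 1 :=
        (PySem.Int.floordiv_eq_iff_of_pos hL).mpr ⟨by omega, by omega⟩
      rw [PySem.Int.floordiv_eq_ediv_of_pos hL] at h1
      omega
  rw [hcount, List.range_succ_eq_map, List.map_cons, List.map_map, List.map_map]
  refine List.cons_eq_cons.mpr ⟨by simp, ?_⟩
  apply List.map_congr_left
  intro k _
  simp only [Function.comp_apply]
  push_cast
  ring

-- shifting a slice window by L equals slicing the L-dropped list
theorem pv_slice_shift (line : List Char) (L i : Int) (hL : 0 ≤ L) (hi : 0 ≤ i) :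
    PySem.List.slice line (some (i + L)) (some (i + L + L))
      = PySem.List.slice (line.drop L.toNat) (some i) (some (i + L)) := by
  rw [PySem.List.slice_toNat line (by omega) (by omega),
      PySem.List.slice_toNat (line.drop L.toNat) hi (by omega)]
  rw [List.drop_drop]
  have h1 : L.toNat + i.toNat = (i + L).toNat := by omega
  have h2 : (i + L + L).toNat - (i + L).toNat = (i + L).toNat - i.toNat := by omega
  rw [h1, h2]

-- the pure chunk list of one line, by peeling (proof-side mirror of pvGo without prefixes)
def pvChunks (length : Int) : Nat → List Char → List (List Char)
  | 0, _ => []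
  | fuel + 1, line =>
    if line ≠ [] ∧ 0 < length then
      PySem.List.slice line none (some length) :: pvChunks length fuel (PySem.List.slice line (some length) none)
    else []

-- pvGo's result: the chunks of the line, head prefixed by pre (unless out is still empty), tail by ic
theorem pvGo_spec (length : Int) (ic : List Char) :
    ∀ (fuel : Nat) (line pre : List Char) (out : List (List Char)), line.length ≤ fuel →
    pvGo length ic fuel line pre out
      = out ++ (match pvChunks length fuel line with
                | [] => []
                | c :: cs => ((if out.isEmpty then [] else pre) ++ c) :: cs.map (fun d => ic ++ d)) := by
  intro fuel
  induction fuel with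
  | zero => intro line pre out _; simp [pvGo, pvChunks]
  | succ n ih =>
    intro line pre out hlen
    by_cases h : line ≠ [] ∧ 0 < length
    · have hrest : (PySem.List.slice line (some length) none).length ≤ n := by
        have := pv_rest_len line length h.1 h.2; omega
      simp only [pvGo, pvChunks, if_pos h]
      rw [ih _ ic _ hrest]
      cases hc : pvChunks length n (PySem.List.slice line (some length) none) with
      | nil => simp
      | cons c cs =>
        have hne : ∀ x : List Char, (out ++ [x]).isEmpty = false := fun x => by
          simp
        simp [hne]
    · simp only [pvGo, pvChunks, if_neg h]
      simp

-- A's stride indices of a line produce exactly the peeled chunks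
theorem pv_chunks_eq (length : Int) (hL : 0 < length) :
    ∀ (fuel : Nat) (line : List Char), line.length ≤ fuel →
    (PySem.List.pyRange 0 (line.length : Int) length).map
        (fun i => PySem.List.slice line (some i) (some (i + length)))
      = pvChunks length fuel line := by
  intro fuel
  induction fuel with
  | zero =>
    intro line hlen
    have : line = [] := List.eq_nil_of_length_eq_zero (Nat.le_zero.mp hlen)
    subst this
    rw [pv_range_nonpos length _ hL (by simp)]
    simp [pvChunks]
  | succ n ih =>
    intro line hlen
    by_cases hl : line = []
    · subst hl
      rw [pv_range_nonpos length _ hL (by simp)]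
      simp [pvChunks]
    · have hn : (0:Int) < (line.length : Int) := by
        have := List.length_pos_iff.mpr hl; exact_mod_cast this
      rw [pv_range_step length hL _ hn, List.map_cons, List.map_map]
      have hshift : ((PySem.List.pyRange 0 ((line.length : Int) - length) length).map
            ((fun i => PySem.List.slice line (some i) (some (i + length))) ∘ (· + length)))
          = (PySem.List.pyRange 0 ((line.length : Int) - length) length).map
            (fun i => PySem.List.slice (line.drop length.toNat) (some i) (some (i + length))) := by
        apply List.map_congr_left
        intro i hi
        rw [PySem.List.pyRange_of_pos _ _ hL] at hi
        simp only [List.mem_map, List.mem_range] at hi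
        obtain ⟨k, -, rfl⟩ := hi
        have hk : (0:Int) ≤ 0 + length * (k : Int) := by positivity
        simpa using pv_slice_shift line length _ (le_of_lt hL) hk
      rw [hshift]
      have hrange : PySem.List.pyRange 0 ((line.length : Int) - length) length
          = PySem.List.pyRange 0 (((line.drop length.toNat).length : Int)) length := by
        by_cases hbig : length ≤ (line.length : Int)
        · have hb : (((line.drop length.toNat).length : Int)) = (line.length : Int) - length := by
            simp only [List.length_drop]
            omega
          rw [hb]
        · rw [pv_range_nonpos length _ hL (by omega),
              pv_range_nonpos length _ hL (by simp only [List.length_drop]; omega)]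
      have hlen2 : (line.drop length.toNat).length ≤ n := by
        have h3 : 0 < line.length := List.length_pos_iff.mpr hl
        have h4 : 0 < length.toNat := by omega
        simp only [List.length_drop]
        omega
      rw [hrange, ih _ hlen2]
      have hrw : pvChunks length (n + 1) line
          = PySem.List.slice line none (some length)
            :: pvChunks length n (PySem.List.slice line (some length) none) := by
        simp [pvChunks, hl, hL]
      rw [hrw, PySem.List.slice_from line (le_of_lt hL)]
      simp

-- A's inner loop once the accumulator is nonempty and all remaining indices are nonzero
theorem pv_innerA (ic icw : List Char) (f : Int → List Char) (is : List Int) :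
    ∀ acc : List (List Char), acc ≠ [] → (∀ i ∈ is, i ≠ 0) →
    is.foldl (fun acc2 i =>
        acc2 ++ [(if acc2.isEmpty then [] else if i ≠ 0 then ic else icw) ++ f i]) acc
      = acc ++ is.map (fun i => ic ++ f i) := by
  induction is with
  | nil => intro acc _ _; simp
  | cons i is ih =>
    intro acc hacc hne
    have hi : i ≠ 0 := hne i (by simp)
    have hae : acc.isEmpty = false := by
      cases acc with | nil => exact absurd rfl hacc | cons _ _ => rfl
    simp only [List.foldl_cons]
    rw [ih (acc ++ [(if acc.isEmpty = true then [] else if i ≠ 0 then ic else icw) ++ f i])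
        (by simp) (fun j hj => hne j (List.mem_cons_of_mem _ hj))]
    simp [hae, hi]

-- the per-line bodies of A's fold and B's fold agree for every length ≠ 0
theorem pv_body_eq (length : Int) (hL : length ≠ 0) (ic icw : List Char)
    (acc : List (List Char)) (line : List Char) :
    (PySem.List.pyRange 0 (line.length : Int) length).foldl (fun acc2 i =>
        acc2 ++ [(if acc2.isEmpty then [] else if i ≠ 0 then ic else icw)
                 ++ PySem.List.slice line (some i) (some (i + length))]) acc
      = pvGo length ic line.length line icw acc := by
  rcases lt_or_gt_of_ne hL with hneg | hpos
  · rw [pv_range_neg length _ hneg (by positivity)]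
    have hgo : pvGo length ic line.length line icw acc = acc := by
      cases hline : line with
      | nil => simp [pvGo]
      | cons a t =>
        simp only [List.length_cons, pvGo]
        rw [if_neg (fun hc => absurd hc.2 (by omega))]
    rw [hgo]
    simp
  · by_cases hl : line = []
    · subst hl
      rw [pv_range_nonpos length _ hpos (by simp)]
      simp [pvGo]
    · have hn : (0:Int) < (line.length : Int) := by
        have := List.length_pos_iff.mpr hl; exact_mod_cast this
      rw [pvGo_spec length ic line.length line icw acc (le_refl _),
          ← pv_chunks_eq length hpos line.length line (le_refl _)]
      rw [pv_range_step length hpos _ hn]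
      set f : Int → List Char := fun i => PySem.List.slice line (some i) (some (i + length)) with hf
      set tail := (PySem.List.pyRange 0 ((line.length : Int) - length) length).map (· + length) with htail
      have hrest : ∀ i ∈ tail, i ≠ 0 := by
        intro i hi
        rw [htail] at hi
        simp only [List.mem_map] at hi
        obtain ⟨j, hj, rfl⟩ := hi
        rw [PySem.List.pyRange_of_pos _ _ hpos] at hj
        simp only [List.mem_map, List.mem_range] at hj
        obtain ⟨k, -, rfl⟩ := hj
        have : (0:Int) ≤ length * (k : Int) := by positivity
        omega
      simp only [List.foldl_cons, List.map_cons]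
      rw [pv_innerA ic icw f tail _ (by simp) hrest]
      simp [List.map_map, Function.comp, hf]

-- ===== VERDICT (by name: the statements are the Claim_ definitions above) =====
theorem wrap_output_spec : Claim_equal_wrap_output := by
  intro text length indentchar indentcharwrap _ hpre
  unfold Spec_wrap_output wrap_output wrap_output_alt
  have hfg : (fun (acc : List (List Char)) (line : List Char) =>
      (PySem.List.pyRange 0 (line.length : Int) length).foldl (fun acc2 i =>
        acc2 ++ [(if acc2.isEmpty then []
                  else if i ≠ 0 then indentchar.toList else (indentcharwrap.getD indentchar).toList)
                 ++ PySem.List.slice line (some i) (some (i + length))]) acc)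
      = (fun (acc : List (List Char)) (line : List Char) =>
          pvGo length indentchar.toList line.length line (indentcharwrap.getD indentchar).toList acc) :=
    funext fun acc => funext fun line =>
      pv_body_eq length hpre indentchar.toList (indentcharwrap.getD indentchar).toList acc line
  exact congrArg String.ofList (congrArg (PySem.Chars.join ['\n'])
    (congrFun (congrFun (congrArg List.foldl hfg) []) (PySem.Chars.splitOn text.toList ['\n'])))
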